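-- pv_equiv track=rewrite | github.com/anewjean/Algorithm | Baekjoon/구현/완전 탐색/동전_게임.py | bfs
-- ===== SOURCE A (Python) =====
-- from collections import deque
--
-- FLIPS = [
--     0b111000000, # 첫 번째 행
--     0b000111000, # 두 번째 행
--     0b000000111, # 세 번째 행
--     0b100100100, # 첫 번재 열
--     0b010010010, # 두 번째 열
--     0b001001001, # 세 번째 열
--     0b100010001, # 왼쪽 위 -> 오른쪽 아래 대각선
--     0b001010100 # 오른쪽 위 -> 왼쪽 아래 대각선
-- ]
--
-- def bfs(start):
--     queue = deque([(start, 0)])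
--     visited = set([start])
--
--     while queue:
--         state, flips = queue.popleft()
--
--         if state == 0 or state == 0b111111111:
--             return flips
--
--         for flip_mask in FLIPS:
--             new_state = state ^ flip_mask
--             if new_state not in visited:
--                 visited.add(new_state)
--                 queue.append((new_state, flips + 1))
--
--     return -1
-- ===== SOURCE B (Python) =====
-- FLIPS = [
--     0b111000000,
--     0b000111000,
--     0b000000111,
--     0b100100100,
--     0b010010010,
--     0b001001001,
--     0b100010001,
--     0b001010100
-- ]
--
-- def bfs(start):
--     # Flips commute and are involutions: the minimum number of flips is the
--     # smallest subset of the 8 masks whose XOR maps start to all-0 or all-1.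
--     best = -1
--     for r in range(256):
--         x = 0
--         pc = 0
--         for i, f in enumerate(FLIPS):
--             if (r >> i) & 1:
--                 x ^= f
--                 pc += 1
--         t = start ^ x
--         if t == 0 or t == 0b111111111:
--             if best == -1 or pc < best:
--                 best = pc
--     return best
-- ===== Notes on version B (the rewrite author's own statement) =====
-- stated objective: alternative
-- what changed: Replaces the BFS with queue and visited set by a closed enumeration of every subset of the eight flip masks, taking the minimum popcount of a subset whose XOR makes the board uniform.
import Mathlib
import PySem

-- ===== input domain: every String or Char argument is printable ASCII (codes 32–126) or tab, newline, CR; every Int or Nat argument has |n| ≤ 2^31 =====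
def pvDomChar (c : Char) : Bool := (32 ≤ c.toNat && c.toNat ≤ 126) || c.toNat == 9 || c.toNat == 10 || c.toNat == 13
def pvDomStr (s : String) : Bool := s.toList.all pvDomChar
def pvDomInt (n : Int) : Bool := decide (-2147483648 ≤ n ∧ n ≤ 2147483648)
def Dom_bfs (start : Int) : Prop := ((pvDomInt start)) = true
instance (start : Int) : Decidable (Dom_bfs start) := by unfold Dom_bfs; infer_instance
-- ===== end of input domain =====

-- B replaces A's BFS (queue + visited set) by a fixed enumeration of every subset of the
-- eight flip masks, returning the minimum popcount of a subset whose XOR makes the board uniform.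

-- ===== PORT A =====
def FLIPS : List Int := [448, 56, 7, 292, 146, 73, 273, 84]

-- the BFS while-loop of A; fuel is only a termination guard: every queue append adds a new
-- element to visited, and visited stays inside a coset of the span of FLIPS (≤ 256 states),
-- so far fewer than 1024 iterations ever happen and the guard is never reached.
def bfsLoop : Nat → List (Int × Int) → PySem.Set Int → Int
  | 0, _, _ => -1
  | _ + 1, [], _ => -1
  | fuel + 1, (state, flips) :: rest, visited =>
    if state = 0 ∨ state = 511 then flips
    else
      match FLIPS.foldl
        (fun (acc : List (Int × Int) × PySem.Set Int) flip_mask =>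
          let new_state := PySem.Int.bxor state flip_mask
          if PySem.Set.contains acc.2 new_state then acc
          else (acc.1 ++ [(new_state, flips + 1)], PySem.Set.add acc.2 new_state))
        (rest, visited) with
      | (queue, visited) => bfsLoop fuel queue visited

def bfs (start : Int) : Int :=
  bfsLoop 1024 [(start, 0)] (PySem.Set.ofList [start])

-- ===== PORT B =====
-- inner loop of B: XOR and popcount of the subset of FLIPS selected by the bits of r
-- (the enumerate index is a nonnegative Int; .toNat is exact here, it is only a shift amount)
def altInner (r : Int) : Int × Int :=
  (PySem.List.enumerate FLIPS).foldl
    (fun (acc : Int × Int) p =>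
      if PySem.Int.band (r >>> p.1.toNat) 1 ≠ 0 then (PySem.Int.bxor acc.1 p.2, acc.2 + 1)
      else acc)
    (0, 0)

def bfs_alt (start : Int) : Int :=
  (PySem.List.pyRange 0 256 1).foldl
    (fun best r =>
      let xp := altInner r
      let t := PySem.Int.bxor start xp.1
      if t = 0 ∨ t = 511 then (if best = -1 ∨ xp.2 < best then xp.2 else best)
      else best)
    (-1)

-- ===== PRECONDITION & SPEC =====
def Spec_bfs (start : Int) (out : Int) : Prop := out = bfs_alt start
instance (start : Int) (out : Int) : Decidable (Spec_bfs start out) := by unfold Spec_bfs; infer_instance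

-- ===== CLAIM (what is proved, stated in full; the proofs are below) =====
def Claim_equal_bfs : Prop := ∀ (start : Int), Dom_bfs start → Spec_bfs start (bfs start)

-- ===== LEMMAS AND PROOFS =====

-- XOR group laws for PySem.Int.bxor
theorem bxor_eq_xor (a b : Int) : PySem.Int.bxor a b = Int.xor a b := by
  cases a with
  | ofNat m => cases b with
    | ofNat n => simp [PySem.Int.bxor, Int.xor]
    | negSucc n => simp [PySem.Int.bxor, Int.xor, Int.negSucc_eq]; omega
  | negSucc m => cases b with
    | ofNat n => simp [PySem.Int.bxor, Int.xor, Int.negSucc_eq]; omega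
    | negSucc n => simp [PySem.Int.bxor, Int.xor, Int.negSucc_eq]; omega

theorem bxor_assoc (a b c : Int) :
    PySem.Int.bxor (PySem.Int.bxor a b) c = PySem.Int.bxor a (PySem.Int.bxor b c) := by
  simp only [bxor_eq_xor]
  cases a <;> cases b <;> cases c <;> simp [Int.xor, Nat.xor_assoc]

theorem zero_bxor (a : Int) : PySem.Int.bxor 0 a = a := by
  rw [PySem.Int.bxor_comm, PySem.Int.bxor_zero]

theorem bxor_cancel (a b : Int) : PySem.Int.bxor a (PySem.Int.bxor a b) = b := by
  rw [← bxor_assoc, PySem.Int.bxor_self, zero_bxor]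

theorem bxor_left_inj (a b c : Int) (h : PySem.Int.bxor a b = PySem.Int.bxor a c) : b = c := by
  have := congrArg (PySem.Int.bxor a) h
  rwa [bxor_cancel, bxor_cancel] at this

theorem bxor_eq_zero (a b : Int) (h : PySem.Int.bxor a b = 0) : a = b := by
  have := congrArg (fun x => PySem.Int.bxor x b) h
  simp only [zero_bxor] at this
  rwa [bxor_assoc, PySem.Int.bxor_self, PySem.Int.bxor_zero] at this

theorem bxor_eq_iff (a b c : Int) (h : PySem.Int.bxor a b = c) : a = PySem.Int.bxor c b := by
  have := congrArg (fun x => PySem.Int.bxor x b) h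
  simp only [] at this
  rwa [bxor_assoc, PySem.Int.bxor_self, PySem.Int.bxor_zero] at this

-- the span (XOR-closure) of FLIPS: the 128 boards reachable from the all-tails board
def spanList : List Int := [0, 7, 10, 13, 16, 23, 26, 29, 34, 37, 40, 47, 50, 53, 56, 63, 67, 68, 73, 78, 83, 84, 89, 94, 97, 102, 107, 108, 113, 118, 123, 124, 130, 133, 136, 143, 146, 149, 152, 159, 160, 167, 170, 173, 176, 183, 186, 189, 193, 198, 203, 204, 209, 214, 219, 220, 227, 228, 233, 238, 243, 244, 249, 254, 257, 262, 267, 268, 273, 278, 283, 284, 291, 292, 297, 302, 307, 308, 313, 318, 322, 325, 328, 335, 338, 341, 344, 351, 352, 359, 362, 365, 368, 375, 378, 381, 387, 388, 393, 398, 403, 404, 409, 414, 417, 422, 427, 428, 433, 438, 443, 444, 448, 455, 458, 461, 464, 471, 474, 477, 482, 485, 488, 495, 498, 501, 504, 511]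

-- the pop trace of A's BFS started at 0 (states with their level, never stopping early)
def TRACE0 : List (Int × Int) := [(0, 0), (448, 1), (56, 1), (7, 1), (292, 1), (146, 1), (73, 1), (273, 1), (84, 1), (504, 2), (455, 2), (228, 2), (338, 2), (393, 2), (209, 2), (404, 2), (63, 2), (284, 2), (170, 2), (113, 2), (297, 2), (108, 2), (291, 2), (149, 2), (78, 2), (278, 2), (83, 2), (438, 2), (365, 2), (53, 2), (368, 2), (219, 2), (387, 2), (198, 2), (344, 2), (29, 2), (325, 2), (511, 3), (220, 3), (362, 3), (433, 3), (233, 3), (428, 3), (227, 3), (341, 3), (398, 3), (214, 3), (403, 3), (118, 3), (173, 3), (501, 3), (176, 3), (283, 3), (67, 3), (262, 3), (152, 3), (477, 3), (133, 3), (302, 3), (107, 3), (13, 3), (328, 3), (443, 3), (254, 3), (352, 3), (37, 3), (381, 3), (50, 3), (375, 3), (388, 3), (193, 3), (351, 3), (26, 3), (322, 3), (167, 3), (482, 3), (124, 3), (313, 3), (97, 3), (458, 3), (143, 3), (471, 3), (268, 3), (238, 4), (427, 4), (461, 4), (136, 4), (123, 4), (318, 4), (160, 4), (485, 4), (189, 4),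 (498, 4), (183, 4), (68, 4), (257, 4), (159, 4), (474, 4), (130, 4), (359, 4), (34, 4), (444, 4), (249, 4), (417, 4), (10, 4), (335, 4), (23, 4), (204, 4), (378, 4), (89, 4), (495, 4), (308, 4), (102, 4), (464, 4), (267, 4), (243, 4), (40, 4), (414, 4), (186, 5), (409, 5), (47, 5), (244, 5), (422, 5), (16, 5), (203, 5), (307, 5), (488, 5), (94, 5)]

-- (xor, popcount) of the subset of FLIPS selected by the bits of r, for r = 0..255
def SUBS : List (Int × Int) := [(0, 0), (448, 1), (56, 1), (504, 2), (7, 1), (455, 2), (63, 2), (511, 3), (292, 1), (228, 2), (284, 2), (220, 3), (291, 2), (227, 3), (283, 3), (219, 4), (146, 1), (338, 2), (170, 2), (362, 3), (149, 2), (341, 3), (173, 3), (365, 4), (438, 2), (118, 3), (398, 3), (78, 4), (433, 3), (113, 4), (393, 4), (73, 5), (73, 1), (393, 2), (113, 2), (433, 3), (78, 2), (398, 3), (118, 3), (438, 4), (365, 2), (173, 3), (341, 3), (149, 4), (362, 3), (170, 4), (338, 4), (146, 5), (219, 2), (283, 3), (227, 3), (291, 4), (220, 3), (284, 4), (228, 4),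 (292, 5), (511, 3), (63, 4), (455, 4), (7, 5), (504, 4), (56, 5), (448, 5), (0, 6), (273, 1), (209, 2), (297, 2), (233, 3), (278, 2), (214, 3), (302, 3), (238, 4), (53, 2), (501, 3), (13, 3), (461, 4), (50, 3), (498, 4), (10, 4), (458, 5), (387, 2), (67, 3), (443, 3), (123, 4), (388, 3), (68, 4), (444, 4), (124, 5), (167, 3), (359, 4), (159, 4), (351, 5), (160, 4), (352, 5), (152, 5), (344, 6), (344, 2), (152, 3), (352, 3), (160, 4), (351, 3), (159, 4), (359, 4), (167, 5), (124, 3), (444, 4), (68, 4), (388, 5), (123, 4), (443, 5), (67, 5), (387, 6), (458, 3), (10, 4), (498, 4), (50, 5), (461, 4), (13, 5), (501, 5), (53, 6), (238, 4), (302, 5), (214, 5), (278, 6), (233, 5), (297, 6), (209, 6), (273, 7), (84, 1), (404, 2), (108, 2), (428, 3), (83, 2), (403, 3), (107, 3), (427, 4), (368, 2), (176, 3), (328, 3), (136, 4), (375, 3), (183, 4), (335, 4), (143, 5), (198, 2), (262, 3), (254, 3), (318, 4), (193, 3), (257, 4), (249, 4), (313, 5), (482, 3), (34, 4), (474, 4),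 (26, 5), (485, 4), (37, 5), (477, 5), (29, 6), (29, 2), (477, 3), (37, 3), (485, 4), (26, 3), (474, 4), (34, 4), (482, 5), (313, 3), (249, 4), (257, 4), (193, 5), (318, 4), (254, 5), (262, 5), (198, 6), (143, 3), (335, 4), (183, 4), (375, 5), (136, 4), (328, 5), (176, 5), (368, 6), (427, 4), (107, 5), (403, 5), (83, 6), (428, 5), (108, 6), (404, 6), (84, 7), (325, 2), (133, 3), (381, 3), (189, 4), (322, 3), (130, 4), (378, 4), (186, 5), (97, 3), (417, 4), (89, 4), (409, 5), (102, 4), (422, 5), (94, 5), (414, 6), (471, 3), (23, 4), (495, 4), (47, 5), (464, 4), (16, 5), (488, 5), (40, 6), (243, 4), (307, 5), (203, 5), (267, 6), (244, 5), (308, 6), (204, 6), (268, 7), (268, 3), (204, 4), (308, 4), (244, 5), (267, 4), (203, 5), (307, 5), (243, 6), (40, 4), (488, 5), (16, 5), (464, 6), (47, 5), (495, 6), (23, 6), (471, 7), (414, 4), (94, 5), (422, 5), (102, 6), (409, 5), (89, 6), (417, 6), (97, 7), (186, 5), (378, 6), (130, 6), (322, 7), (189, 6), (381, 7), (133, 7),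 (325, 8)]

-- the translated-trace and subset-table forms that the ports are reduced to
def Arhs (start : Int) : Int :=
  match (TRACE0.map (fun p => (PySem.Int.bxor start p.1, p.2))).find?
      (fun p => decide (p.1 = 0 ∨ p.1 = 511)) with
  | some p => p.2
  | none => -1

def Brhs (start : Int) : Int :=
  SUBS.foldl
    (fun best xp =>
      if PySem.Int.bxor start xp.1 = 0 ∨ PySem.Int.bxor start xp.1 = 511 then
        (if best = -1 ∨ xp.2 < best then xp.2 else best)
      else best)
    (-1)

-- bfsLoop never stops early in this trace variant; it records the popped (state, flips)
def bfsTrace : Nat → List (Int × Int) → PySem.Set Int → List (Int × Int)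
  | 0, _, _ => []
  | _ + 1, [], _ => []
  | fuel + 1, (state, flips) :: rest, visited =>
    (state, flips) ::
      (match FLIPS.foldl
        (fun (acc : List (Int × Int) × PySem.Set Int) flip_mask =>
          let new_state := PySem.Int.bxor state flip_mask
          if PySem.Set.contains acc.2 new_state then acc
          else (acc.1 ++ [(new_state, flips + 1)], PySem.Set.add acc.2 new_state))
        (rest, visited) with
      | (queue, visited) => bfsTrace fuel queue visited)

-- bfsLoop = label of the first popped goal state in the trace (else -1)
set_option maxHeartbeats 4000000 in
theorem loop_eq_trace (fuel : Nat) :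
    ∀ (q : List (Int × Int)) (v : PySem.Set Int),
    bfsLoop fuel q v =
      (match (bfsTrace fuel q v).find? (fun p => decide (p.1 = 0 ∨ p.1 = 511)) with
       | some p => p.2
       | none => -1) := by
  induction fuel with
  | zero => intro q v; rfl
  | succ n ih =>
    intro q v
    match q with
    | [] => rfl
    | (state, flips) :: rest =>
      show (if state = 0 ∨ state = 511 then flips
          else match FLIPS.foldl
            (fun (acc : List (Int × Int) × PySem.Set Int) flip_mask =>
              let new_state := PySem.Int.bxor state flip_mask
              if PySem.Set.contains acc.2 new_state then acc
              else (acc.1 ++ [(new_state, flips + 1)], PySem.Set.add acc.2 new_state))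
            (rest, v) with
          | (queue, visited) => bfsLoop n queue visited)
        = (match ((state, flips) ::
            (match FLIPS.foldl
              (fun (acc : List (Int × Int) × PySem.Set Int) flip_mask =>
                let new_state := PySem.Int.bxor state flip_mask
                if PySem.Set.contains acc.2 new_state then acc
                else (acc.1 ++ [(new_state, flips + 1)], PySem.Set.add acc.2 new_state))
              (rest, v) with
            | (queue, visited) => bfsTrace n queue visited)).find?
              (fun p => decide (p.1 = 0 ∨ p.1 = 511)) with
          | some p => p.2
          | none => -1)
      rcases hE : FLIPS.foldl
        (fun (acc : List (Int × Int) × PySem.Set Int) flip_mask =>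
          let new_state := PySem.Int.bxor state flip_mask
          if PySem.Set.contains acc.2 new_state then acc
          else (acc.1 ++ [(new_state, flips + 1)], PySem.Set.add acc.2 new_state))
        (rest, v) with ⟨q2, v2⟩
      by_cases hgoal : state = 0 ∨ state = 511
      · rw [if_pos hgoal, List.find?_cons_of_pos (by simp only [decide_eq_true_eq]; exact hgoal)]
      · rw [if_neg hgoal, List.find?_cons_of_neg (by simp only [decide_eq_true_eq]; exact hgoal)]
        exact ih q2 v2

-- membership in a visited set is invariant under the XOR translation
theorem contains_map (start x : Int) (v : List Int) :
    (v.map (fun m => PySem.Int.bxor start m)).contains (PySem.Int.bxor start x) = v.contains x := by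
  induction v with
  | nil => rfl
  | cons a rest ih =>
    simp only [List.map_cons, List.contains_cons, ih]
    by_cases h : x = a
    · subst h; simp
    · have : (PySem.Int.bxor start x == PySem.Int.bxor start a) = false := by
        apply beq_eq_false_iff_ne.mpr
        intro hc
        exact h (bxor_left_inj start x a hc)
      rw [this]
      have : (x == a) = false := beq_eq_false_iff_ne.mpr h
      rw [this]

-- the expansion fold commutes with the XOR translation
set_option maxHeartbeats 1000000 in
theorem fold_equivariant (start state flips : Int) :
    ∀ (masks : List Int) (q : List (Int × Int)) (v : PySem.Set Int),
    masks.foldl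
      (fun (acc : List (Int × Int) × PySem.Set Int) flip_mask =>
        let new_state := PySem.Int.bxor (PySem.Int.bxor start state) flip_mask
        if PySem.Set.contains acc.2 new_state then acc
        else (acc.1 ++ [(new_state, flips + 1)], PySem.Set.add acc.2 new_state))
      (q.map (fun p => (PySem.Int.bxor start p.1, p.2)),
       v.map (fun m => PySem.Int.bxor start m))
    = ((masks.foldl
        (fun (acc : List (Int × Int) × PySem.Set Int) flip_mask =>
          let new_state := PySem.Int.bxor state flip_mask
          if PySem.Set.contains acc.2 new_state then acc
          else (acc.1 ++ [(new_state, flips + 1)], PySem.Set.add acc.2 new_state))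
        (q, v)).1.map (fun p => (PySem.Int.bxor start p.1, p.2)),
       ((masks.foldl
        (fun (acc : List (Int × Int) × PySem.Set Int) flip_mask =>
          let new_state := PySem.Int.bxor state flip_mask
          if PySem.Set.contains acc.2 new_state then acc
          else (acc.1 ++ [(new_state, flips + 1)], PySem.Set.add acc.2 new_state))
        (q, v)).2.map (fun m => PySem.Int.bxor start m))) := by
  have hfun : (fun (acc : List (Int × Int) × PySem.Set Int) flip_mask =>
        let new_state := PySem.Int.bxor (PySem.Int.bxor start state) flip_mask
        if PySem.Set.contains acc.2 new_state then acc
        else (acc.1 ++ [(new_state, flips + 1)], PySem.Set.add acc.2 new_state))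
      = (fun (acc : List (Int × Int) × PySem.Set Int) flip_mask =>
        let new_state := PySem.Int.bxor start (PySem.Int.bxor state flip_mask)
        if PySem.Set.contains acc.2 new_state then acc
        else (acc.1 ++ [(new_state, flips + 1)], PySem.Set.add acc.2 new_state)) := by
    funext acc fm
    simp only [bxor_assoc]
  simp only [hfun]
  intro masks
  induction masks with
  | nil => intro q v; rfl
  | cons f fs ih =>
    intro q v
    simp only [List.foldl_cons, PySem.Set.contains, PySem.Set.add, contains_map]
    by_cases hc : List.contains v (PySem.Int.bxor state f) = true
    · simp only [hc, if_true]
      exact ih q v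
    · simp only [hc, Bool.false_eq_true, if_false]
      have e1 : (q.map (fun p => (PySem.Int.bxor start p.1, p.2))
            ++ [(PySem.Int.bxor start (PySem.Int.bxor state f), flips + 1)])
          = ((q ++ [(PySem.Int.bxor state f, flips + 1)]).map
              (fun p => (PySem.Int.bxor start p.1, p.2))) := by simp
      have e2 : (v.map (fun m => PySem.Int.bxor start m)
            ++ [PySem.Int.bxor start (PySem.Int.bxor state f)])
          = ((v ++ [PySem.Int.bxor state f]).map (fun m => PySem.Int.bxor start m)) := by simp
      rw [e1, e2]
      exact ih (q ++ [(PySem.Int.bxor state f, flips + 1)]) (v ++ [PySem.Int.bxor state f])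

set_option maxHeartbeats 1000000 in
theorem trace_equivariant (start : Int) (fuel : Nat) :
    ∀ (q : List (Int × Int)) (v : PySem.Set Int),
    bfsTrace fuel (q.map (fun p => (PySem.Int.bxor start p.1, p.2)))
        (v.map (fun m => PySem.Int.bxor start m))
      = (bfsTrace fuel q v).map (fun p => (PySem.Int.bxor start p.1, p.2)) := by
  induction fuel with
  | zero => intro q v; rfl
  | succ n ih =>
    intro q v
    match q with
    | [] => rfl
    | (state, flips) :: rest =>
      simp only [List.map_cons]
      rw [bfsTrace, bfsTrace]
      rw [fold_equivariant start state flips FLIPS rest v]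
      rcases hE : FLIPS.foldl
        (fun (acc : List (Int × Int) × PySem.Set Int) flip_mask =>
          let new_state := PySem.Int.bxor state flip_mask
          if PySem.Set.contains acc.2 new_state then acc
          else (acc.1 ++ [(new_state, flips + 1)], PySem.Set.add acc.2 new_state))
        (rest, v) with ⟨q2, v2⟩
      simp only [List.map_cons, List.cons.injEq, true_and]
      exact ih q2 v2

set_option maxRecDepth 1000000 in
theorem trace_lit :
    bfsTrace 1024 [((0 : Int), (0 : Int))] [(0 : Int)] = TRACE0 := by
  decide

set_option maxRecDepth 100000 in
theorem subs_lit : (PySem.List.pyRange 0 256 1).map altInner = SUBS := by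
  decide

theorem bfs_char (start : Int) : bfs start = Arhs start := by
  unfold bfs Arhs
  rw [loop_eq_trace]
  have h1 : [(start, (0 : Int))]
      = ([((0 : Int), (0 : Int))].map (fun p => (PySem.Int.bxor start p.1, p.2))) := by
    simp [PySem.Int.bxor_zero]
  have h2 : (PySem.Set.ofList [start] : PySem.Set Int)
      = ([(0 : Int)].map (fun m => PySem.Int.bxor start m)) := by
    simp [PySem.Int.bxor_zero]
    rfl
  rw [h1, h2, trace_equivariant, trace_lit]

theorem alt_char (start : Int) : bfs_alt start = Brhs start := by
  unfold bfs_alt Brhs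
  rw [← subs_lit, List.foldl_map]

-- every state in the trace / subset table lies in the span, which is closed under ⊕511
set_option maxRecDepth 100000 in
theorem trace_mem_span : ∀ p ∈ TRACE0, p.1 ∈ spanList := by decide
set_option maxRecDepth 100000 in
theorem subs_mem_span : ∀ p ∈ SUBS, p.1 ∈ spanList := by decide
set_option maxRecDepth 100000 in
theorem span_closed_511 : ∀ m ∈ spanList, PySem.Int.bxor 511 m ∈ spanList := by decide

-- the two reduced forms agree on the 128 starts inside the span …
set_option maxRecDepth 1000000 in
theorem span_agree : ∀ s ∈ spanList, Arhs s = Brhs s := by decide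

-- … and are both -1 outside it
theorem goal_cases (start : Int) (h : start ∉ spanList) (x : Int) (hx : x ∈ spanList) :
    ¬ (PySem.Int.bxor start x = 0 ∨ PySem.Int.bxor start x = 511) := by
  rintro (h0 | h5)
  · exact h ((bxor_eq_zero start x h0) ▸ hx)
  · have hs : start = PySem.Int.bxor 511 x := bxor_eq_iff start x 511 h5
    rw [hs] at h
    exact h (span_closed_511 x hx)

theorem Arhs_notin (start : Int) (h : start ∉ spanList) : Arhs start = -1 := by
  unfold Arhs
  have : (TRACE0.map (fun p => (PySem.Int.bxor start p.1, p.2))).find?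
      (fun p => decide (p.1 = 0 ∨ p.1 = 511)) = none := by
    rw [List.find?_eq_none]
    intro x hx
    rcases List.mem_map.mp hx with ⟨p, hp, rfl⟩
    simp only [decide_eq_true_eq]
    exact goal_cases start h p.1 (trace_mem_span p hp)
  rw [this]

theorem Brhs_notin (start : Int) (h : start ∉ spanList) : Brhs start = -1 := by
  unfold Brhs
  have main : ∀ (l : List (Int × Int)), (∀ p ∈ l, p.1 ∈ spanList) → ∀ (b : Int),
      l.foldl
        (fun best xp =>
          if PySem.Int.bxor start xp.1 = 0 ∨ PySem.Int.bxor start xp.1 = 511 then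
            (if best = -1 ∨ xp.2 < best then xp.2 else best)
          else best)
        b = b := by
    intro l
    induction l with
    | nil => intro _ b; rfl
    | cons p rest ih =>
      intro hl b
      simp only [List.foldl_cons]
      rw [if_neg (goal_cases start h p.1 (hl p (by simp)))]
      exact ih (fun q hq => hl q (by simp [hq])) b
  exact main SUBS subs_mem_span (-1)

-- ===== VERDICT (by name: the statement is the Claim_ definition above) =====
theorem bfs_spec : Claim_equal_bfs := by
  intro start _
  unfold Spec_bfs
  rw [bfs_char, alt_char]
  by_cases hmem : start ∈ spanList
  · exact span_agree start hmem
  · rw [Arhs_notin start hmem, Brhs_notin start hmem]
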